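-- pv_equiv track=rewrite | github.com/tema7707/Course-work-3 | utils/utils.py | kaggle_to_rle_format
-- ===== SOURCE A (Python) =====
-- def kaggle_to_rle_format(arr, height, width):
--     """Converts from Kaggle format to COCO RLE format.
--
--     Args:
--       arr: segmentation info about one object from 'EncodedPixels' column
--       height: height of image
--       width: width of image
--
--     Returns:
--       Segmentation information about one object in COCO RLE format.
--     """
--     correct = [0] * (len(arr) + 1)
--     curr = 0
--     for i in range(len(arr)):
--         if i % 2 == 0:
--             correct[i] = arr[i] - curr
--             curr = arr[i]
--         else:
--             correct[i] = arr[i]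
--             curr += arr[i]
--
--     correct[len(arr)] = height * width - curr
--     return correct
-- ===== SOURCE B (Python) =====
-- def kaggle_to_rle_format(arr, height, width):
--     """Converts from Kaggle format to COCO RLE format (stateless, index-based)."""
--     n = len(arr)
--     out = []
--     for i in range(n):
--         if i % 2 == 1:
--             out.append(arr[i])
--         elif i == 0:
--             out.append(arr[0])
--         else:
--             out.append(arr[i] - arr[i - 1] - arr[i - 2])
--     if n == 0:
--         last = 0
--     elif n % 2 == 1:
--         last = arr[n - 1]
--     else:
--         last = arr[n - 1] + arr[n - 2]
--     out.append(height * width - last)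
--     return out
-- ===== Notes on version B (the rewrite author's own statement) =====
-- stated objective: alternative
-- what changed: Replaces the sequential curr-accumulator with a stateless direct-index formulation: each output element is computed from arr[i], arr[i-1], arr[i-2] alone, and the trailing element from the last one or two entries by parity, instead of threading a running position through the loop.
import Mathlib
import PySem

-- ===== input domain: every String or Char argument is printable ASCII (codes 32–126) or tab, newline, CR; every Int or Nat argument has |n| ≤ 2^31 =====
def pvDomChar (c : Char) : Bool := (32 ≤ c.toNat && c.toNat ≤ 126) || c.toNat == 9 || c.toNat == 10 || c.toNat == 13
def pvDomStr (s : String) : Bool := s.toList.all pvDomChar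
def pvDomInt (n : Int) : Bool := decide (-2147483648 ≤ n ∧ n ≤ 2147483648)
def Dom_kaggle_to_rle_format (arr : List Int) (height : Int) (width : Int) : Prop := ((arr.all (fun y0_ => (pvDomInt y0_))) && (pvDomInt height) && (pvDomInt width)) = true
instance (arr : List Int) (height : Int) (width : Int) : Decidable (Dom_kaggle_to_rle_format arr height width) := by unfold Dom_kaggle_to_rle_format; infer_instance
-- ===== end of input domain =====

-- B replaces A's running `curr` accumulator with a stateless direct-index formula per element (alternative decomposition, same cost).


-- ===== PORT A =====
-- loop body of A's `for i in range(len(arr))`; arr[i] with 0 ≤ i < len arr is exact as arr.getD i 0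
def pvAStep (arr : List Int) (st : List Int × Int) (i : Nat) : List Int × Int :=
  if i % 2 = 0 then
    ((st.1.set i (arr.getD i 0 - st.2)), arr.getD i 0)
  else
    ((st.1.set i (arr.getD i 0)), st.2 + arr.getD i 0)

def kaggle_to_rle_format (arr : List Int) (height : Int) (width : Int) : List Int :=
  let init : List Int := List.replicate (arr.length + 1) 0
  let res := (List.range arr.length).foldl (pvAStep arr) (init, 0)
  res.1.set arr.length (height * width - res.2)

-- ===== PORT B =====
-- per-index value appended by B's loop
def pvBVal (arr : List Int) (i : Nat) : Int :=
  if i % 2 = 1 then arr.getD i 0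
  else if i = 0 then arr.getD 0 0
  else arr.getD i 0 - arr.getD (i - 1) 0 - arr.getD (i - 2) 0

def kaggle_to_rle_format_alt (arr : List Int) (height : Int) (width : Int) : List Int :=
  let n := arr.length
  let out := (List.range n).map (pvBVal arr)
  let last : Int :=
    if n = 0 then 0
    else if n % 2 = 1 then arr.getD (n - 1) 0
    else arr.getD (n - 1) 0 + arr.getD (n - 2) 0
  out ++ [height * width - last]

-- ===== PRECONDITION & SPEC =====
def Spec_kaggle_to_rle_format (arr : List Int) (height : Int) (width : Int) (out : List Int) : Prop := out = kaggle_to_rle_format_alt arr height width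
instance (arr : List Int) (height : Int) (width : Int) (out : List Int) : Decidable (Spec_kaggle_to_rle_format arr height width out) := by unfold Spec_kaggle_to_rle_format; infer_instance

-- ===== CLAIM (what is proved, stated in full; the proofs are below) =====
def Claim_equal_kaggle_to_rle_format : Prop := ∀ (arr : List Int) (height : Int) (width : Int), Dom_kaggle_to_rle_format arr height width → Spec_kaggle_to_rle_format arr height width (kaggle_to_rle_format arr height width)

-- ===== LEMMAS AND PROOFS =====

-- closed form of A's running accumulator `curr` after k iterations
def pvCur (arr : List Int) (k : Nat) : Int :=
  if k = 0 then 0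
  else if (k - 1) % 2 = 0 then arr.getD (k - 1) 0
  else arr.getD (k - 2) 0 + arr.getD (k - 1) 0

theorem pv_loop_char (arr : List Int) (k : Nat) (hk : k ≤ arr.length) :
    (List.range k).foldl (pvAStep arr) (List.replicate (arr.length + 1) 0, 0) =
      ((List.range k).map (pvBVal arr) ++ List.replicate (arr.length + 1 - k) (0 : Int),
        pvCur arr k) := by
  induction k with
  | zero => simp [pvCur]
  | succ k ih =>
    have hk' : k ≤ arr.length := Nat.le_of_succ_le hk
    rw [List.range_succ, List.foldl_append, ih hk']
    have hrep : List.replicate (arr.length + 1 - k) (0 : Int)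
        = 0 :: List.replicate (arr.length + 1 - (k + 1)) (0 : Int) := by
      have : arr.length + 1 - k = (arr.length + 1 - (k + 1)) + 1 := by omega
      rw [this, List.replicate_succ]
    have hlen : ((List.range k).map (pvBVal arr)).length = k := by simp
    have hset : ∀ v : Int,
        (((List.range k).map (pvBVal arr)) ++ List.replicate (arr.length + 1 - k) (0 : Int)).set k v
          = ((List.range k).map (pvBVal arr)) ++ (v :: List.replicate (arr.length + 1 - (k + 1)) (0 : Int)) := by
      intro v
      rw [hrep, List.set_append_right _ _ (by omega)]
      simp [hlen]
    have hmap : (List.range k ++ [k]).map (pvBVal arr) ++ List.replicate (arr.length + 1 - (k + 1)) (0 : Int)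
        = ((List.range k).map (pvBVal arr)) ++ (pvBVal arr k :: List.replicate (arr.length + 1 - (k + 1)) (0 : Int)) := by
      rw [List.map_append, List.append_assoc]
      simp
    rcases Nat.even_or_odd k with hke | hko
    · -- k even
      have h2 : k % 2 = 0 := Nat.even_iff.mp hke
      simp only [List.foldl_cons, List.foldl_nil, pvAStep, h2]
      rw [if_pos trivial, hset, hmap, Prod.mk.injEq]
      refine ⟨?_, ?_⟩
      · congr 2
        by_cases h0 : k = 0
        · subst h0; simp [pvBVal, pvCur]
        · have hodd : ¬ (k - 1) % 2 = 0 := by omega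
          have e : k - 1 - 1 = k - 2 := by omega
          simp only [pvBVal, pvCur, if_neg (by omega : ¬ k % 2 = 1), if_neg h0, if_neg hodd, e]
          ring
      · simp [pvCur, h2]
    · -- k odd
      have h2 : k % 2 = 1 := Nat.odd_iff.mp hko
      simp only [List.foldl_cons, List.foldl_nil, pvAStep, if_neg (by omega : ¬ k % 2 = 0)]
      rw [hset, hmap, Prod.mk.injEq]
      refine ⟨?_, ?_⟩
      · congr 2
        simp [pvBVal, h2]
      · have h0 : k ≠ 0 := by omega
        have hk1 : (k - 1) % 2 = 0 := by omega
        have e1 : k + 1 - 2 = k - 1 := by omega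
        simp [pvCur, h0, hk1, h2, e1]

theorem pv_cur_eq_last (arr : List Int) :
    pvCur arr arr.length =
      (if arr.length = 0 then 0
       else if arr.length % 2 = 1 then arr.getD (arr.length - 1) 0
       else arr.getD (arr.length - 1) 0 + arr.getD (arr.length - 2) 0) := by
  by_cases h0 : arr.length = 0
  · simp [pvCur, h0]
  · simp only [pvCur, if_neg h0]
    rcases Nat.even_or_odd arr.length with he | ho
    · have h2 : arr.length % 2 = 0 := Nat.even_iff.mp he
      have : ¬ (arr.length - 1) % 2 = 0 := by omega
      simp only [if_neg this, if_neg (by omega : ¬ arr.length % 2 = 1)]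
      exact add_comm _ _
    · have h2 : arr.length % 2 = 1 := Nat.odd_iff.mp ho
      have : (arr.length - 1) % 2 = 0 := by omega
      simp [this, h2]

-- ===== VERDICT (by name: the statement is the Claim_ definition above) =====
theorem kaggle_to_rle_format_spec : Claim_equal_kaggle_to_rle_format := by
  intro arr height width _
  unfold Spec_kaggle_to_rle_format kaggle_to_rle_format kaggle_to_rle_format_alt
  simp only []
  rw [pv_loop_char arr arr.length (le_refl _)]
  simp only [Nat.add_sub_cancel_left]
  rw [pv_cur_eq_last]
  have hlen : ((List.range arr.length).map (pvBVal arr)).length = arr.length := by simp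
  rw [List.set_append_right _ _ (by omega)]
  simp [hlen]
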